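-- pv_equiv track=rewrite | github.com/Agilomatrix/Packaging | pack.py | _get_first_of_each_type
-- ===== SOURCE A (Python) =====
-- def _get_first_of_each_type(all_images):
--     """Get the first image of each type as fallback"""
--     first_images = {}
--     seen_types = set()
--
--     for img_key, img_data in all_images.items():
--         img_type = img_data.get('type', 'current')
--         if img_type not in seen_types:
--             first_images[img_key] = img_data
--             seen_types.add(img_type)
--             if len(first_images) >= 4:  # Max 4 types
--                 break
--
--     return first_images
-- ===== SOURCE B (Python) =====
-- def _get_first_of_each_type(all_images):
--     """Get the first image of each type as fallback"""
--     items = list(all_images.items())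
--     firsts = [(key, data) for i, (key, data) in enumerate(items)
--               if data.get('type', 'current') not in
--                  [other.get('type', 'current') for _, other in items[:i]]]
--     return dict(firsts[:4])
-- ===== Notes on version B (the rewrite author's own statement) =====
-- stated objective: alternative
-- what changed: B replaces A's stateful single pass (result dict + seen-types set + in-loop break at 4) with a stateless nested-scan comprehension that keeps an item iff its type occurs among no earlier item's types, applying the max-4 cap and the dict construction afterwards; it trades O(n) state-tracking for an O(n^2) prefix scan.
import Mathlib
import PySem

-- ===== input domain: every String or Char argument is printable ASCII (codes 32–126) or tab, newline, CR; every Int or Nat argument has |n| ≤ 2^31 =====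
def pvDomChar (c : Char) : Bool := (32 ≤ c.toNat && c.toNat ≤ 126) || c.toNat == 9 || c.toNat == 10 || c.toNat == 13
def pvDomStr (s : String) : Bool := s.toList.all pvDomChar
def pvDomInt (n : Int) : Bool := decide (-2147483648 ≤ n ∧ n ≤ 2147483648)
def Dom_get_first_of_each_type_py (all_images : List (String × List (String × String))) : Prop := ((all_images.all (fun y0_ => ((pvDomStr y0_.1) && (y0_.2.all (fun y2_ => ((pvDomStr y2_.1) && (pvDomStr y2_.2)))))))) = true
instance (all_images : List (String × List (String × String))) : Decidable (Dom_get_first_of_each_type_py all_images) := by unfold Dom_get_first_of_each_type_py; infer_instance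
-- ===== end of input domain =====

-- B replaces A's stateful pass (result dict + seen-set + break at 4) with a stateless nested-scan
-- comprehension (keep an item iff no earlier item has its type), cap 4 and dict applied afterwards (objective: alternative).


-- ===== PORT A =====
-- loop over all_images.items() with the two accumulators first_images (dict) and seen_types (set),
-- breaking as soon as first_images holds 4 entries
def pvGoA : List (String × List (String × String)) → PySem.Set String →
    PySem.Dict String (List (String × String)) → PySem.Dict String (List (String × String))
  | [], _, first_images => first_images
  | (img_key, img_data) :: rest, seen_types, first_images =>
      let img_type := (PySem.Dict.mk img_data).getD "type" "current"
      if seen_types.contains img_type then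
        pvGoA rest seen_types first_images
      else
        let first' := first_images.insert img_key img_data
        let seen' := seen_types.add img_type
        if 4 ≤ first'.size then first' else pvGoA rest seen' first'

def get_first_of_each_type_py (all_images : List (String × List (String × String))) : List (String × List (String × String)) :=
  (pvGoA all_images PySem.Set.empty PySem.Dict.empty).items

-- ===== PORT B =====
-- data.get('type', 'current') for one item
def pvTy (p : String × List (String × String)) : String :=
  (PySem.Dict.mk p.2).getD "type" "current"

-- firsts = [(key,data) for i,(key,data) in enumerate(items) if ty(data) not in [ty(other) for _,other in items[:i]]]
-- then dict(firsts[:4])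
def get_first_of_each_type_py_alt (all_images : List (String × List (String × String))) : List (String × List (String × String)) :=
  (PySem.Dict.ofList (PySem.List.slice
      (((PySem.List.enumerate all_images 0).filter
          (fun ip => !decide (pvTy ip.2 ∈ (PySem.List.slice all_images none (some ip.1)).map pvTy))).map (·.2))
      none (some 4))).items

-- ===== PRECONDITION & SPEC =====
-- Pre_ excludes association lists with duplicate outer keys: the argument is a Python dict, whose
-- keys are necessarily distinct, so such lists represent no Python input at all.
def Pre_get_first_of_each_type_py (all_images : List (String × List (String × String))) : Prop :=
  (all_images.map Prod.fst).Nodup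
instance (all_images : List (String × List (String × String))) : Decidable (Pre_get_first_of_each_type_py all_images) := by
  unfold Pre_get_first_of_each_type_py; infer_instance

def pvWitness_get_first_of_each_type_py : (List (String × List (String × String))) :=
  [("a", [("type", "x")]), ("b", [("type", "x")]), ("c", [])]

def Spec_get_first_of_each_type_py (all_images : List (String × List (String × String))) (out : List (String × List (String × String))) : Prop := out = get_first_of_each_type_py_alt all_images
instance (all_images : List (String × List (String × String))) (out : List (String × List (String × String))) : Decidable (Spec_get_first_of_each_type_py all_images out) := by unfold Spec_get_first_of_each_type_py; infer_instance

-- ===== CLAIM (what is proved, stated in full; the proofs are below) =====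
def Claim_equal_get_first_of_each_type_py : Prop := ∀ (all_images : List (String × List (String × String))), Dom_get_first_of_each_type_py all_images → Pre_get_first_of_each_type_py all_images → Spec_get_first_of_each_type_py all_images (get_first_of_each_type_py all_images)

-- ===== LEMMAS AND PROOFS =====

-- first-occurrence filter: keep an item iff its type is neither in `seen` nor among earlier kept-or-skipped items' types
def pvFF : List (String × List (String × String)) → List String → List (String × List (String × String))
  | [], _ => []
  | p :: r, seen =>
      if pvTy p ∈ seen then pvFF r (seen ++ [pvTy p]) else p :: pvFF r (seen ++ [pvTy p])

theorem pvFF_sublist (l : List (String × List (String × String))) (seen : List String) :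
    (pvFF l seen).Sublist l := by
  induction l generalizing seen with
  | nil => simp [pvFF]
  | cons p r ih =>
    simp only [pvFF]
    split
    · exact (ih _).trans (List.sublist_cons_self _ _)
    · exact (ih _).cons_cons _

-- B's comprehension computes pvFF
theorem pvB_eq_pvFF (l pre : List (String × List (String × String))) :
    (((PySem.List.enumerate l (pre.length : Int)).filter
        (fun ip => !decide (pvTy ip.2 ∈ (PySem.List.slice (pre ++ l) none (some ip.1)).map pvTy))).map (·.2))
      = pvFF l (pre.map pvTy) := by
  induction l generalizing pre with
  | nil => simp [pvFF, PySem.List.enumerate_nil]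
  | cons p r ih =>
    rw [PySem.List.enumerate_cons]
    have hslice : PySem.List.slice (pre ++ p :: r) none (some (pre.length : Int))
        = pre := by
      rw [PySem.List.slice_to_natCast]
      simp
    have hih := ih (pre ++ [p])
    have hlen : ((pre ++ [p]).length : Int) = (pre.length : Int) + 1 := by
      simp
    rw [hlen, List.append_assoc] at hih
    simp only [List.cons_append, List.nil_append, List.map_append, List.map_cons,
      List.map_nil] at hih ⊢
    by_cases h : pvTy p ∈ pre.map pvTy
    · simp only [pvFF, List.filter_cons, hslice, h, decide_true, Bool.not_true,
        Bool.false_eq_true, if_false]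
      exact hih
    · simp only [pvFF, List.filter_cons, hslice, h, decide_false, Bool.not_false,
        if_pos, List.map_cons]
      simp only [if_false]
      exact congrArg _ hih

-- main loop invariant: A's loop agrees with take-(4−collected) of the first-occurrence filter
theorem pvMain (l : List (String × List (String × String)))
    (seen : PySem.Set String) (seenL : List String)
    (first : PySem.Dict String (List (String × String)))
    (hc : ∀ t, seen.contains t = decide (t ∈ seenL))
    (hlen : first.items.length < 4)
    (hnd : (l.map Prod.fst ++ first.items.map Prod.fst).Nodup) :
    (pvGoA l seen first).items = first.items ++ (pvFF l seenL).take (4 - first.items.length) := by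
  induction l generalizing seen seenL first with
  | nil => simp [pvGoA, pvFF]
  | cons p rest ih =>
    obtain ⟨img_key, img_data⟩ := p
    have hty : pvTy (img_key, img_data) = (PySem.Dict.mk img_data).getD "type" "current" := rfl
    simp only [pvGoA, pvFF, hty]
    by_cases h : (PySem.Dict.mk img_data).getD "type" "current" ∈ seenL
    · have hsc : seen.contains ((PySem.Dict.mk img_data).getD "type" "current") = true := by
        rw [hc]; simpa using h
      rw [if_pos hsc, if_pos h]
      refine ih seen (seenL ++ [(PySem.Dict.mk img_data).getD "type" "current"]) first ?_ hlen ?_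
      · intro t
        rw [hc t]
        by_cases ht : t = (PySem.Dict.mk img_data).getD "type" "current"
        · subst ht; simp [h]
        · simp [ht]
      · simp only [List.map_cons, List.cons_append, List.nodup_cons] at hnd
        exact hnd.2
    · have hsc : seen.contains ((PySem.Dict.mk img_data).getD "type" "current") = false := by
        rw [hc]; simpa using h
      rw [if_neg (by simpa [PySem.Set.contains] using hsc), if_neg h]
      have hkey : first.contains img_key = false := by
        simp only [List.map_cons, List.cons_append, List.nodup_cons] at hnd
        have hmem : img_key ∉ first.items.map Prod.fst :=
          fun hm => hnd.1 (List.mem_append.mpr (Or.inr hm))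
        rw [PySem.Dict.contains_eq_decide_mem_keys]
        simp [PySem.Dict.keys, hmem]
      have hfirst' : (first.insert img_key img_data).items
          = first.items ++ [(img_key, img_data)] :=
        PySem.Dict.items_insert_of_not_contains _ _ hkey
      have hc' : ∀ t, (seen.add ((PySem.Dict.mk img_data).getD "type" "current")).contains t
          = decide (t ∈ seenL ++ [(PySem.Dict.mk img_data).getD "type" "current"]) := by
        intro t
        have haddeq : seen.add ((PySem.Dict.mk img_data).getD "type" "current")
            = seen ++ [(PySem.Dict.mk img_data).getD "type" "current"] := by
          unfold PySem.Set.add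
          rw [if_neg (by simpa [PySem.Set.contains] using hsc)]
        rw [haddeq]
        have hct := hc t
        by_cases ht : t = (PySem.Dict.mk img_data).getD "type" "current"
        · subst ht; simp [PySem.Set.contains]
        · simp [PySem.Set.contains, ht] at hct ⊢
          simpa [PySem.Set.contains] using hct
      by_cases hsz : 4 ≤ (first.insert img_key img_data).size
      · rw [if_pos hsz]
        have h4 : first.items.length = 3 := by
          have : (first.insert img_key img_data).items.length = first.items.length + 1 := by
            simp [hfirst']
          simp only [PySem.Dict.size] at hsz
          omega
        rw [hfirst', h4]
        simp
      · rw [if_neg hsz]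
        have hlen' : (first.insert img_key img_data).items.length < 4 := by
          simp only [PySem.Dict.size] at hsz
          omega
        have hnd' : (rest.map Prod.fst ++ (first.insert img_key img_data).items.map Prod.fst).Nodup := by
          rw [hfirst']
          have hperm : (rest.map Prod.fst ++ (first.items ++ [(img_key, img_data)]).map Prod.fst).Perm
              (((img_key, img_data) :: rest).map Prod.fst ++ first.items.map Prod.fst) := by
            simp only [List.map_append, List.map_cons, List.map_nil, List.cons_append]
            refine (List.Perm.of_eq (List.append_assoc _ _ _).symm).trans ?_
            exact List.perm_append_comm
          exact hperm.symm.nodup hnd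
        rw [ih _ _ _ hc' hlen' hnd', hfirst']
        have hl : (first.insert img_key img_data).items.length = first.items.length + 1 := by
          simp [hfirst']
        rw [hfirst'] at hl
        have : 4 - first.items.length = (4 - (first.items.length + 1)) + 1 := by omega
        rw [this, List.take_succ_cons]
        simp [hl]

-- ===== VERDICT (by name: the statement is the Claim_ definition above) =====
theorem get_first_of_each_type_py_spec : Claim_equal_get_first_of_each_type_py := by
  intro all_images _hdom hpre
  unfold Spec_get_first_of_each_type_py
  unfold Pre_get_first_of_each_type_py at hpre
  -- A's side
  have hA : get_first_of_each_type_py all_images = (pvFF all_images []).take 4 := by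
    unfold get_first_of_each_type_py
    rw [pvMain all_images PySem.Set.empty [] PySem.Dict.empty
      (by intro t; simp [PySem.Set.empty, PySem.Set.contains])
      (by simp [PySem.Dict.empty])
      (by simpa [PySem.Dict.empty, PySem.Dict.items] using hpre)]
    simp [PySem.Dict.empty]
  -- B's side
  have hB : (((PySem.List.enumerate all_images 0).filter
        (fun ip => !decide (pvTy ip.2 ∈ (PySem.List.slice all_images none (some ip.1)).map pvTy))).map (·.2))
      = pvFF all_images [] := by
    simpa using pvB_eq_pvFF all_images []
  have hslice4 : PySem.List.slice (pvFF all_images []) none (some (4 : Int))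
      = (pvFF all_images []).take 4 := by
    rw [show ((4:Int)) = ((4:Nat):Int) by norm_num, PySem.List.slice_to_natCast]
  -- distinct keys of the collected items
  have hndvals : (((pvFF all_images []).take 4).map Prod.fst).Nodup := by
    have h1 : (((pvFF all_images []).take 4).map Prod.fst).Sublist
        ((pvFF all_images []).map Prod.fst) :=
      List.Sublist.map _ (List.take_sublist _ _)
    have h2 : ((pvFF all_images []).map Prod.fst).Sublist (all_images.map Prod.fst) :=
      List.Sublist.map _ (pvFF_sublist _ _)
    exact ((h1.trans h2).nodup hpre)
  unfold get_first_of_each_type_py_alt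
  rw [hB, hslice4]
  have hfresh : ∀ p ∈ (pvFF all_images []).take 4,
      (PySem.Dict.empty : PySem.Dict String (List (String × String))).contains p.1 = false := by
    intro p _; exact PySem.Dict.contains_empty _
  have hitems := PySem.Dict.items_foldl_insert_fresh ((pvFF all_images []).take 4)
    Prod.fst Prod.snd PySem.Dict.empty hfresh hndvals
  have hof : (PySem.Dict.ofList ((pvFF all_images []).take 4)).items
      = ((pvFF all_images []).take 4) := by
    show (PySem.Dict.empty.update ((pvFF all_images []).take 4)).items = _
    unfold PySem.Dict.update
    rw [hitems]
    simp [PySem.Dict.empty]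
  rw [hof, hA]
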